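-- pv_equiv track=rewrite | github.com/Tanushree713/BasicsInPython | PractiseSet.py | reversedArr
-- ===== SOURCE A (Python) =====
-- def reversedArr(arr) :
--     stack = []
--     result = []
--     for i in range( len(arr)):
--         stack.append(arr[i])
--     while stack:
--         result.append(stack.pop())
--
--     return result
-- ===== SOURCE B (Python) =====
-- def reversedArr(arr):
--     result = []
--     for i in range(len(arr) - 1, -1, -1):
--         result.append(arr[i])
--     return result
-- ===== Notes on version B (the rewrite author's own statement) =====
-- stated objective: simpler
-- what changed: Drops the push-then-pop stack and builds the result in one backward index pass (range(len(arr)-1,-1,-1)), maintaining only the output list.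
import Mathlib
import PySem

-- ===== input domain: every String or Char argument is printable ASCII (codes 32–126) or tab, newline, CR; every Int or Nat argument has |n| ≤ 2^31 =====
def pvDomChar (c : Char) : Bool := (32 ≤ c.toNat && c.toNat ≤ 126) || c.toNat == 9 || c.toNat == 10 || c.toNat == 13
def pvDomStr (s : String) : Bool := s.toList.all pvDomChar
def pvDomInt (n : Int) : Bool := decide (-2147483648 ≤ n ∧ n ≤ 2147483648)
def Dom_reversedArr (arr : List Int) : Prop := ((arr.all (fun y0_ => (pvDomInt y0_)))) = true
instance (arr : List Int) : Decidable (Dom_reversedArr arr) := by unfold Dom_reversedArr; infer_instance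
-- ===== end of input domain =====

-- B drops A's push-then-pop stack and builds the result in one backward index pass (objective: simpler).

-- ===== PORT A =====
-- while stack: result.append(stack.pop())  — recursion on the stack, popping the last element each step
def pvPopLoop (stack result : List Int) : List Int :=
  match h : PySem.List.pop? stack with
  | none => result
  | some (x, rest) => pvPopLoop rest (result ++ [x])
termination_by stack.length
decreasing_by
  have := PySem.List.length_of_pop?_eq_some stack h
  simp at this
  omega

def reversedArr (arr : List Int) : List Int :=
  -- for i in range(len(arr)): stack.append(arr[i])  — arr[i] is always in range here, so pyGetD is exact
  let stack := (PySem.List.pyRange 0 (PySem.List.len arr) 1).foldl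
    (fun st i => st ++ [PySem.List.pyGetD arr i 0]) []
  pvPopLoop stack []

-- ===== PORT B =====
def reversedArr_alt (arr : List Int) : List Int :=
  -- for i in range(len(arr)-1, -1, -1): result.append(arr[i])  — i is always in range, so pyGetD is exact
  (PySem.List.pyRange (PySem.List.len arr - 1) (-1) (-1)).foldl
    (fun res i => res ++ [PySem.List.pyGetD arr i 0]) []

-- ===== PRECONDITION & SPEC =====
def Spec_reversedArr (arr : List Int) (out : List Int) : Prop := out = reversedArr_alt arr
instance (arr : List Int) (out : List Int) : Decidable (Spec_reversedArr arr out) := by unfold Spec_reversedArr; infer_instance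

-- ===== CLAIM (what is proved, stated in full; the proofs are below) =====
def Claim_equal_reversedArr : Prop := ∀ (arr : List Int), Dom_reversedArr arr → Spec_reversedArr arr (reversedArr arr)

-- ===== LEMMAS AND PROOFS =====
theorem foldl_snoc_eq_append_map {α β : Type} (g : α → β) :
    ∀ (l : List α) (r : List β), l.foldl (fun res i => res ++ [g i]) r = r ++ l.map g := by
  intro l
  induction l with
  | nil => intro r; simp
  | cons x xs ih => intro r; simp [List.foldl_cons, ih]

theorem foldl_snoc_id {α : Type} :
    ∀ (l : List α) (r : List α), l.foldl (fun res i => res ++ [i]) r = r ++ l := by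
  intro l
  induction l with
  | nil => intro r; simp
  | cons x xs ih => intro r; simp [List.foldl_cons, ih]

theorem pvPopLoop_nil (r : List Int) : pvPopLoop [] r = r := by
  rw [pvPopLoop]
  simp [PySem.List.pop?, PySem.List.pyIdx?]

theorem pvPopLoop_snoc (xs : List Int) (x : Int) (r : List Int) :
    pvPopLoop (xs ++ [x]) r = pvPopLoop xs (r ++ [x]) := by
  rw [pvPopLoop]
  rw [PySem.List.pop?_last]

theorem pvPopLoop_eq (s : List Int) : ∀ (r : List Int), pvPopLoop s r = r ++ s.reverse := by
  induction s using List.reverseRecOn with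
  | nil => intro r; simp [pvPopLoop_nil]
  | append_singleton xs x ih => intro r; simp [pvPopLoop_snoc, ih]

theorem reversedArr_eq_reverse (arr : List Int) : reversedArr arr = arr.reverse := by
  unfold reversedArr
  rw [PySem.List.foldl_pyRange_zero_pyGetD arr 0 (fun st v => st ++ [v]) []]
  show pvPopLoop (arr.foldl (fun res i => res ++ [i]) []) [] = arr.reverse
  rw [foldl_snoc_id arr [], pvPopLoop_eq]
  simp

theorem reversedArr_alt_eq_reverse (arr : List Int) : reversedArr_alt arr = arr.reverse := by
  unfold reversedArr_alt
  rw [PySem.List.pyRange_neg_one_eq_reverse]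
  rw [foldl_snoc_eq_append_map (fun i => PySem.List.pyGetD arr i 0)]
  rw [show (-1 : Int) + 1 = 0 by ring, show PySem.List.len arr - 1 + 1 = PySem.List.len arr by ring]
  rw [List.map_reverse, PySem.List.map_pyGetD_pyRange_zero]
  simp

-- ===== VERDICT (by name: the statement is the Claim_ definition above) =====
theorem reversedArr_spec : Claim_equal_reversedArr := by
  intro arr _
  unfold Spec_reversedArr
  rw [reversedArr_eq_reverse, reversedArr_alt_eq_reverse]
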